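-- pv_equiv track=rewrite | github.com/robertmaury/6.00x | Midterm1/madForm.py | generateForm
-- ===== SOURCE A (Python) =====
-- def generateForm(story, listOfAdjs, listOfNouns, listOfVerbs):
--     '''
--     story: a string containing sentences
--     listOfAdjs: a list of valid adjectives
--     listOfNouns: a list of valid nouns
--     listOfVerbs: a list of valid verbs
--
--     For each word in story that is in one of the lists,
--     * replace it with the string '[ADJ]' if the word is in listOfAdjs
--     * replace it with the string '[VERB]' if the word is in listOfVerbs
--     * replace it with the string '[NOUN]' if the word is in listOfNouns
--
--     returns: string, A Mad-Libs form of the story.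
--     '''
--     listStory = story.split(' ')
--     madForm = ''
--     for word in listStory:
--         if word in listOfAdjs:
--             madForm += '[ADJ]' + ' '
--         elif word in listOfNouns:
--             madForm += '[NOUN]' + ' '
--         elif word in listOfVerbs:
--             madForm += '[VERB]' + ' '
--         else:
--             madForm +=  word + ' '
--     return madForm
-- ===== SOURCE B (Python) =====
-- def generateForm(story, listOfAdjs, listOfNouns, listOfVerbs):
--     # Single character-level pass over the story (no split): a tiny state machine
--     # accumulates the current word and flushes its tag (or the word) at each space
--     # and at the end.  Tags come from one word->tag table filled in reverse-priority
--     # order (verbs, then nouns, then adjs overwrite) to match the adj/noun/verb rule.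
--     tag = {}
--     for w in listOfVerbs:
--         tag[w] = '[VERB]'
--     for w in listOfNouns:
--         tag[w] = '[NOUN]'
--     for w in listOfAdjs:
--         tag[w] = '[ADJ]'
--     pieces = []
--     cur = []
--     for c in story:
--         if c == ' ':
--             w = ''.join(cur)
--             pieces.append(tag.get(w, w))
--             pieces.append(' ')
--             cur = []
--         else:
--             cur.append(c)
--     w = ''.join(cur)
--     pieces.append(tag.get(w, w))
--     pieces.append(' ')
--     return ''.join(pieces)
-- ===== Notes on version B (the rewrite author's own statement) =====
-- stated objective: alternative
-- what changed: Instead of splitting the story and scanning three lists per word, B makes one character-level pass over the story with a state machine that accumulates the current word and flushes at each space, looking each finished word up in a word->tag table built once in reverse-priority order.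
import Mathlib
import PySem

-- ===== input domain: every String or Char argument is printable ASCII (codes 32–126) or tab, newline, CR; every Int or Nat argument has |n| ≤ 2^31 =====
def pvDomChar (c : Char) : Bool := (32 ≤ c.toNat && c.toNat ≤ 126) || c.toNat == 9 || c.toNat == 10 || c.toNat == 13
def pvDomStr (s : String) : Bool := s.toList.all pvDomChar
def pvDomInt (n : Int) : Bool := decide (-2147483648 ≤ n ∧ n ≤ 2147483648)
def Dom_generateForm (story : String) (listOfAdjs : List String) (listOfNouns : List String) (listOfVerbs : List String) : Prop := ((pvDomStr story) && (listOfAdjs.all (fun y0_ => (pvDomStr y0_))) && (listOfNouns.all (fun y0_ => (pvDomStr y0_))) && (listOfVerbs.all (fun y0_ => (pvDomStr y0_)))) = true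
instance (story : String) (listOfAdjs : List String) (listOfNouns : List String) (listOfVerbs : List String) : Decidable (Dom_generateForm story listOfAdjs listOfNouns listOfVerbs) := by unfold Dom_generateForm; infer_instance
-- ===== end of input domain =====

-- B replaces A's split-then-scan-three-lists loop by one character-level pass over the
-- story (a state machine flushing each word at a space) with a word->tag table built
-- once in reverse-priority order (alternative decomposition, same cost class).

-- ===== PORT A =====
def generateForm (story : String) (listOfAdjs : List String) (listOfNouns : List String) (listOfVerbs : List String) : String :=
  ((PySem.Str.split? story " ").getD []).foldl
    (fun madForm word =>
      if listOfAdjs.contains word then madForm ++ ("[ADJ]" ++ " ")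
      else if listOfNouns.contains word then madForm ++ ("[NOUN]" ++ " ")
      else if listOfVerbs.contains word then madForm ++ ("[VERB]" ++ " ")
      else madForm ++ (word ++ " ")) ""

-- ===== PORT B =====
-- 'for w in ws: tag[w] = t'
def fillTag (d : PySem.Dict String String) (ws : List String) (t : String) : PySem.Dict String String :=
  ws.foldl (fun d w => d.insert w t) d

def generateForm_alt (story : String) (listOfAdjs : List String) (listOfNouns : List String) (listOfVerbs : List String) : String :=
  let tag := fillTag (fillTag (fillTag PySem.Dict.empty listOfVerbs "[VERB]") listOfNouns "[NOUN]") listOfAdjs "[ADJ]"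
  -- one pass over the characters of story: state = (pieces so far, current word chars)
  let st := story.toList.foldl
    (fun (st : List String × List Char) c =>
      if c = ' ' then
        let w := String.ofList st.2
        (st.1 ++ [tag.getD w w, " "], [])
      else (st.1, st.2 ++ [c])) ([], [])
  let w := String.ofList st.2
  PySem.Str.join "" (st.1 ++ [tag.getD w w, " "])

-- ===== PRECONDITION & SPEC =====
def Spec_generateForm (story : String) (listOfAdjs : List String) (listOfNouns : List String) (listOfVerbs : List String) (out : String) : Prop := out = generateForm_alt story listOfAdjs listOfNouns listOfVerbs
instance (story : String) (listOfAdjs : List String) (listOfNouns : List String) (listOfVerbs : List String) (out : String) : Decidable (Spec_generateForm story listOfAdjs listOfNouns listOfVerbs out) := by unfold Spec_generateForm; infer_instance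

-- ===== CLAIM (what is proved, stated in full; the proofs are below) =====
def Claim_equal_generateForm : Prop := ∀ (story : String) (listOfAdjs : List String) (listOfNouns : List String) (listOfVerbs : List String), Dom_generateForm story listOfAdjs listOfNouns listOfVerbs → Spec_generateForm story listOfAdjs listOfNouns listOfVerbs (generateForm story listOfAdjs listOfNouns listOfVerbs)

-- ===== LEMMAS AND PROOFS =====

-- lookup in a constant-valued fill
theorem getD_fillTag (ws : List String) (d : PySem.Dict String String) (t k : String) :
    (fillTag d ws t).getD k k = if ws.contains k then t else d.getD k k := by
  induction ws generalizing d with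
  | nil => simp [fillTag]
  | cons x xs ih =>
    simp only [fillTag, List.foldl_cons] at *
    rw [ih]
    by_cases hx : k = x
    · subst hx; simp [PySem.Dict.getD_insert]
    · simp [hx, PySem.Dict.getD_insert]

theorem join_empty_cons (x : String) (xs : List String) :
    PySem.Str.join "" (x :: xs) = x ++ PySem.Str.join "" xs := by
  apply String.toList_inj.mp
  simp [PySem.Str.toList_join, PySem.Chars.join, List.intercalate]
  induction xs with
  | nil => simp
  | cons y ys ih => simp

theorem join_empty_nil : PySem.Str.join "" ([] : List String) = "" := by
  apply String.toList_inj.mp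
  simp [PySem.Str.toList_join, PySem.Chars.join, List.intercalate]

theorem foldl_eq_join (t : String → String) (ws : List String) :
    ∀ acc : String,
      ws.foldl (fun m w => m ++ (t w ++ " ")) acc
        = acc ++ PySem.Str.join "" (ws.flatMap (fun w => [t w, " "])) := by
  induction ws with
  | nil => intro acc; simp [join_empty_nil]
  | cons x xs ih =>
    intro acc
    simp only [List.foldl_cons, List.flatMap_cons, List.cons_append, List.nil_append]
    rw [ih, join_empty_cons, join_empty_cons]
    simp [String.append_assoc]

-- structural description of splitting a char list at ' ' with current word cur
def words : List Char → List Char → List (List Char)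
  | [], cur => [cur]
  | c :: rest, cur => if c = ' ' then cur :: words rest [] else words rest (cur ++ [c])

theorem go_eq_words (sep : List Char) (hsep : sep = [' ']) :
    ∀ (fuel : Nat) (l cur : List Char) (acc : List (List Char)), l.length < fuel →
      PySem.Chars.splitOn.go sep fuel l cur acc = acc.reverse ++ words l cur.reverse := by
  subst hsep
  intro fuel
  induction fuel with
  | zero => intro l cur acc h; omega
  | succ n ih =>
    intro l cur acc h
    cases l with
    | nil => simp [PySem.Chars.splitOn.go, words]
    | cons c rest =>
      by_cases hc : c = ' '
      · subst hc
        rw [show PySem.Chars.splitOn.go [' '] (n+1) (' ' :: rest) cur acc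
              = PySem.Chars.splitOn.go [' '] n rest [] (cur.reverse :: acc) by
            simp [PySem.Chars.splitOn.go, List.isPrefixOf]]
        rw [ih rest [] (cur.reverse :: acc) (by simpa using Nat.lt_of_succ_lt_succ h)]
        simp [words]
      · rw [show PySem.Chars.splitOn.go [' '] (n+1) (c :: rest) cur acc
              = PySem.Chars.splitOn.go [' '] n rest (c :: cur) acc by
            simp [PySem.Chars.splitOn.go, List.isPrefixOf, hc]
            intro h'
            exact absurd h'.symm hc]
        rw [ih rest (c :: cur) acc (by simpa using Nat.lt_of_succ_lt_succ h)]
        simp [words, hc]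

theorem splitOn_eq_words (l : List Char) :
    PySem.Chars.splitOn l [' '] = words l [] := by
  rw [PySem.Chars.splitOn, go_eq_words [' '] rfl (l.length + 1) l [] [] (by omega)]
  simp

-- invariant of B's character scan
theorem scan_eq_words (g : String → String) (cs : List Char) :
    ∀ (pieces : List String) (cur : List Char),
      (let st := cs.foldl
        (fun (st : List String × List Char) c =>
          if c = ' ' then (st.1 ++ [g (String.ofList st.2), " "], [])
          else (st.1, st.2 ++ [c])) (pieces, cur)
       st.1 ++ [g (String.ofList st.2), " "])
      = pieces ++ (words cs cur).flatMap (fun w => [g (String.ofList w), " "]) := by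
  induction cs with
  | nil => intro pieces cur; simp [words]
  | cons c rest ih =>
    intro pieces cur
    by_cases hc : c = ' '
    · subst hc
      simp only [List.foldl_cons, words]
      rw [ih]
      simp
    · simp only [List.foldl_cons, if_neg hc, words, if_neg hc]
      exact ih pieces (cur ++ [c])

-- ===== VERDICT (by name: the statement is the Claim_ definition above) =====
theorem generateForm_spec : Claim_equal_generateForm := by
  intro story listOfAdjs listOfNouns listOfVerbs _
  unfold Spec_generateForm generateForm generateForm_alt
  set tag := fillTag (fillTag (fillTag PySem.Dict.empty listOfVerbs "[VERB]") listOfNouns "[NOUN]") listOfAdjs "[ADJ]" with htag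
  set t : String → String := fun w =>
    if listOfAdjs.contains w then "[ADJ]"
    else if listOfNouns.contains w then "[NOUN]"
    else if listOfVerbs.contains w then "[VERB]" else w with ht
  have hgt : ∀ w, tag.getD w w = t w := by
    intro w
    simp only [htag, ht]
    rw [getD_fillTag, getD_fillTag, getD_fillTag]
    simp only [PySem.Dict.getD_empty]
  have hA : (fun (madForm : String) (word : String) =>
      if listOfAdjs.contains word then madForm ++ ("[ADJ]" ++ " ")
      else if listOfNouns.contains word then madForm ++ ("[NOUN]" ++ " ")
      else if listOfVerbs.contains word then madForm ++ ("[VERB]" ++ " ")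
      else madForm ++ (word ++ " "))
      = fun m w => m ++ (t w ++ " ") := by
    funext m w; simp only [ht]; split_ifs <;> rfl
  -- A's word list
  have hsplit : (PySem.Str.split? story " ").getD []
      = (words story.toList []).map String.ofList := by
    simp [PySem.Str.split?, PySem.Chars.split?, splitOn_eq_words]
  rw [hsplit, hA, foldl_eq_join]
  -- B's side: the scan invariant
  have hB := scan_eq_words (fun w => tag.getD w w) story.toList [] []
  simp only at hB
  dsimp only
  rw [hB]
  simp only [List.nil_append, List.flatMap_map, hgt]
  exact String.empty_append
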